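-- pv_equiv track=rewrite | github.com/GhermanCristian/Sem1_FP | Lab2/main - Copy.py | firstSequence
-- ===== SOURCE A (Python) =====
-- def getRealPart(com):
--     return com[0]
--
-- def getImagPart(com):
--     return com[1]
--
-- def modulus(com):
--     #returns the square of the modulus of the complex number "com"
--     #I use the square in order not to use sqrt and lose some precision
--     return getRealPart(com) ** 2 + getImagPart(com) ** 2
--
-- def firstSequence(nrList):
--     #determines the longest list of complex numbers who have the same modulus
--     '''
--     length = len(nrList)
--     pos = 1
--     seqLength = 1
--     maxLength = 1
--     answer = []
--
--     while pos < length: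
--         if equalModulus(nrList[pos - 1], nrList[pos]):
--             seqLength += 1
--         else:
--             if seqLength > maxLength:
--                 maxLength = seqLength
--                 answer = nrList[pos - maxLength: pos]
--             seqLength = 1
--         pos += 1
--
--     if seqLength > maxLength:
--         answer = nrList[pos - seqLength: pos]
--
--     return answer
--     '''
--     length = len(nrList)
--     pos = 0
--     maxLength = 1
--     answer = []
--     while pos < length:
--         mod = modulus(nrList[pos])
--         initPos = pos
--         while pos + 1 < length and mod == modulus(nrList[pos + 1]):
--             pos += 1
--         if pos - initPos + 1 > maxLength:
--             maxLength = pos - initPos + 1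
--             answer = nrList[initPos: pos + 1]
--         pos += 1
--
--     return answer
-- ===== SOURCE B (Python) =====
-- def getRealPart(com):
--     return com[0]
--
-- def getImagPart(com):
--     return com[1]
--
-- def modulus(com):
--     return getRealPart(com) ** 2 + getImagPart(com) ** 2
--
-- def firstSequence(nrList):
--     # Phase 1: partition the list into maximal runs of equal squared modulus.
--     groups = []
--     current = []
--     currentMod = None
--     for c in nrList:
--         m = modulus(c)
--         if m == currentMod:
--             current.append(c)
--         else:
--             if current:
--                 groups.append(current)
--             current = [c]
--             currentMod = m
--     if current:
--         groups.append(current)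
--     # Phase 2: pick the first run strictly longer than 1 with maximal length.
--     maxLength = 1
--     answer = []
--     for g in groups:
--         if len(g) > maxLength:
--             maxLength = len(g)
--             answer = g
--     return answer
-- ===== Notes on version B (the rewrite author's own statement) =====
-- stated objective: alternative
-- what changed: B splits the work into two phases in groupby style: first build the list of all maximal equal-modulus runs, then a separate pass picks the first run strictly longer than 1 of maximal length, instead of A's interleaved nested-while scan that tracks max/answer while scanning.
import Mathlib
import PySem

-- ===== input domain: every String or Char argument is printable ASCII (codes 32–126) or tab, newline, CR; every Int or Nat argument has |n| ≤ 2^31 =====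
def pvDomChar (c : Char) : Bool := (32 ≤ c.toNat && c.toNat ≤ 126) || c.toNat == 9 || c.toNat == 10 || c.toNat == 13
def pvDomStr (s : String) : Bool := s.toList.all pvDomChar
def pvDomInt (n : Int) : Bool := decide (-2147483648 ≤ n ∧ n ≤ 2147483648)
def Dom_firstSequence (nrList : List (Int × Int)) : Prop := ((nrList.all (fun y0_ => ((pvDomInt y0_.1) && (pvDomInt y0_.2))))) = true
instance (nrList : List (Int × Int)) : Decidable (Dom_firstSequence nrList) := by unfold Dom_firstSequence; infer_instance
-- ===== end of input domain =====

-- B replaces A's interleaved nested-while scan by a two-phase decomposition (build all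
-- maximal equal-modulus runs first, then a separate max-finding pass); objective: alternative.

-- ===== PORT A =====
def getRealPart (com : Int × Int) : Int := com.1

def getImagPart (com : Int × Int) : Int := com.2

def pvModulus (com : Int × Int) : Int := getRealPart com ^ 2 + getImagPart com ^ 2

-- A's inner while loop: how far pos advances while the modulus stays equal to `mod`.
def countRun (mod : Int) : List (Int × Int) → Nat
  | [] => 0
  | y :: ys => if mod = pvModulus y then countRun mod ys + 1 else 0

-- A's outer while loop over the suffix starting at pos, with state (maxLength, answer).
def aLoop : List (Int × Int) → Int → List (Int × Int) → List (Int × Int)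
  | [], _, ans => ans
  | x :: rest, maxLen, ans =>
      let k := countRun (pvModulus x) rest
      if ((k : Int) + 1) > maxLen then
        aLoop (rest.drop k) ((k : Int) + 1) (x :: rest.take k)
      else
        aLoop (rest.drop k) maxLen ans
termination_by l _ _ => l.length
decreasing_by
  · simp only [List.length_drop, List.length_cons]; omega
  · simp only [List.length_drop, List.length_cons]; omega

def firstSequence (nrList : List (Int × Int)) : List (Int × Int) := aLoop nrList 1 []

-- ===== PORT B =====
-- phase-1 loop body: state is (groups, current, currentMod)
def bStep (s : List (List (Int × Int)) × List (Int × Int) × Option Int) (c : Int × Int) :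
    List (List (Int × Int)) × List (Int × Int) × Option Int :=
  let m := pvModulus c
  if some m = s.2.2 then (s.1, s.2.1 ++ [c], s.2.2)
  else ((if s.2.1 ≠ [] then s.1 ++ [s.2.1] else s.1), [c], some m)

def bPhase1 (l : List (Int × Int)) : List (List (Int × Int)) :=
  let s := l.foldl bStep ([], [], none)
  if s.2.1 ≠ [] then s.1 ++ [s.2.1] else s.1

-- phase-2 loop body: state is (maxLength, answer)
def bStep2 (acc : Int × List (Int × Int)) (g : List (Int × Int)) : Int × List (Int × Int) :=
  if (g.length : Int) > acc.1 then ((g.length : Int), g) else acc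

def firstSequence_alt (nrList : List (Int × Int)) : List (Int × Int) :=
  (List.foldl bStep2 (1, []) (bPhase1 nrList)).2

-- ===== PRECONDITION & SPEC =====
def Spec_firstSequence (nrList : List (Int × Int)) (out : List (Int × Int)) : Prop := out = firstSequence_alt nrList
instance (nrList : List (Int × Int)) (out : List (Int × Int)) : Decidable (Spec_firstSequence nrList out) := by unfold Spec_firstSequence; infer_instance

-- ===== CLAIM (what is proved, stated in full; the proofs are below) =====
def Claim_equal_firstSequence : Prop := ∀ (nrList : List (Int × Int)), Dom_firstSequence nrList → Spec_firstSequence nrList (firstSequence nrList)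

-- ===== LEMMAS AND PROOFS =====

-- the list of maximal equal-modulus runs, as a reference point between the two ports
def groupRuns : List (Int × Int) → List (List (Int × Int))
  | [] => []
  | x :: xs =>
      (x :: xs.takeWhile (fun y => pvModulus y = pvModulus x)) ::
        groupRuns (xs.dropWhile (fun y => pvModulus y = pvModulus x))
termination_by l => l.length
decreasing_by
  have := List.length_dropWhile_le (fun y => decide (pvModulus y = pvModulus x)) xs
  simp only [List.length_cons]; omega

-- the post-loop flush of B's phase 1, as a named function for the proofs
def bFinish (s : List (List (Int × Int)) × List (Int × Int) × Option Int) :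
    List (List (Int × Int)) :=
  if s.2.1 ≠ [] then s.1 ++ [s.2.1] else s.1

theorem countRun_eq (m : Int) (xs : List (Int × Int)) :
    countRun m xs = (xs.takeWhile (fun y => pvModulus y = m)).length := by
  induction xs with
  | nil => simp [countRun]
  | cons y ys ih =>
    by_cases h : pvModulus y = m
    · simp [countRun, List.takeWhile, h, ih]
    · simp [countRun, List.takeWhile, h, Ne.symm h]

theorem take_run (m : Int) (xs : List (Int × Int)) :
    xs.take ((xs.takeWhile (fun y => pvModulus y = m)).length)
      = xs.takeWhile (fun y => pvModulus y = m) := by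
  rw [← countRun_eq]
  induction xs with
  | nil => simp [countRun]
  | cons y ys ih =>
    by_cases h : pvModulus y = m
    · simp [countRun, List.takeWhile, h, ih]
    · simp [countRun, List.takeWhile, h, Ne.symm h]

theorem drop_run (m : Int) (xs : List (Int × Int)) :
    xs.drop ((xs.takeWhile (fun y => pvModulus y = m)).length)
      = xs.dropWhile (fun y => pvModulus y = m) := by
  rw [← countRun_eq]
  induction xs with
  | nil => simp [countRun]
  | cons y ys ih =>
    by_cases h : pvModulus y = m
    · simp [countRun, List.dropWhile, h, ih]
    · simp [countRun, List.dropWhile, h, Ne.symm h]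

theorem aLoop_eq_fold (n : Nat) : ∀ (l : List (Int × Int)), l.length ≤ n →
    ∀ (maxLen : Int) (ans : List (Int × Int)),
      aLoop l maxLen ans = (List.foldl bStep2 (maxLen, ans) (groupRuns l)).2 := by
  induction n with
  | zero =>
    intro l hl maxLen ans
    have hnil : l = [] := List.eq_nil_of_length_eq_zero (Nat.le_zero.mp hl)
    subst hnil
    simp [aLoop, groupRuns]
  | succ n ih =>
    intro l hl maxLen ans
    cases l with
    | nil => simp [aLoop, groupRuns]
    | cons x rest =>
      have hlen : (rest.dropWhile (fun y => pvModulus y = pvModulus x)).length ≤ n := by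
        have := List.length_dropWhile_le (fun y => decide (pvModulus y = pvModulus x)) rest
        simp only [List.length_cons] at hl; omega
      rw [aLoop, groupRuns]
      simp only [List.foldl_cons, bStep2, List.length_cons]
      rw [countRun_eq, take_run, drop_run]
      push_cast
      split_ifs with h
      · exact ih _ hlen _ _
      · exact ih _ hlen _ _

-- invariant of B's phase-1 loop: with a nonempty current run of modulus m, finishing the
-- fold yields the closed groups, then the extended current run, then the remaining runs.
theorem bPhase1_aux : ∀ (l : List (Int × Int)) (groups : List (List (Int × Int)))
    (cur : List (Int × Int)) (m : Int), cur ≠ [] →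
    bFinish (l.foldl bStep (groups, cur, some m))
    = groups ++ (cur ++ l.takeWhile (fun y => pvModulus y = m)) ::
        groupRuns (l.dropWhile (fun y => pvModulus y = m)) := by
  intro l
  induction l with
  | nil => intro groups cur m hcur; simp [bFinish, groupRuns, hcur]
  | cons c l' ih =>
    intro groups cur m hcur
    rw [List.foldl_cons]
    by_cases h : pvModulus c = m
    · rw [show bStep (groups, cur, some m) c = (groups, cur ++ [c], some m) from by
        simp [bStep, h]]
      rw [ih groups (cur ++ [c]) m (by simp)]
      simp [h]
    · rw [show bStep (groups, cur, some m) c = (groups ++ [cur], [c], some (pvModulus c)) from by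
        simp [bStep, h, hcur]]
      rw [ih (groups ++ [cur]) [c] (pvModulus c) (by simp)]
      simp only [List.takeWhile_cons, List.dropWhile_cons, h, decide_false, Bool.false_eq_true,
        if_false]
      rw [groupRuns]
      simp

theorem bPhase1_eq_groupRuns (l : List (Int × Int)) : bPhase1 l = groupRuns l := by
  have hfin : bPhase1 l = bFinish (l.foldl bStep ([], [], none)) := rfl
  cases l with
  | nil => simp [bPhase1, groupRuns]
  | cons c l' =>
    rw [hfin, List.foldl_cons]
    rw [show bStep ([], [], none) c = ([], [c], some (pvModulus c)) from by simp [bStep]]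
    rw [bPhase1_aux l' [] [c] (pvModulus c) (by simp)]
    rw [groupRuns]
    simp

-- ===== VERDICT (by name: the statement is the Claim_ definition above) =====
theorem firstSequence_spec : Claim_equal_firstSequence := by
  intro l _
  unfold Spec_firstSequence firstSequence firstSequence_alt
  rw [bPhase1_eq_groupRuns]
  exact aLoop_eq_fold l.length l le_rfl 1 []
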